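-- pv_equiv track=rewrite | github.com/Moser9815/homr-serverless | pitch_from_position.py | determine_clef_from_positions
-- ===== SOURCE A (Python) =====
-- DIATONIC_SEMITONES = [0, 2, 4, 5, 7, 9, 11]
--
-- NOTE_NAMES = ["C", "D", "E", "F", "G", "A", "B"]
--
-- CLEF_REF = {
--     # Treble: bottom line (pos 1) = E4, so pos 0 = D4
--     "treble": (1, 4),  # (note_index_in_CDEFGAB, octave)
--     # Bass: bottom line (pos 1) = G2, so pos 0 = F2
--     "bass": (3, 2),
--     # Alto (C clef line 3): middle line = C4, bottom line = F3,
--     # so pos 0 = E3. E is index 2, octave 3.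
--     "alto": (2, 3),
--     # Tenor (C clef line 4): bottom line = D3, pos 0 = C3.
--     "tenor": (0, 3),
-- }
--
-- SHARP_ORDER = [3, 0, 4, 1, 5, 2, 6]  # F C G D A E B
--
-- FLAT_ORDER = [6, 2, 5, 1, 4, 0, 3]   # B E A D G C F
--
-- def position_to_midi(position: int, clef: str, fifths: int = 0) -> tuple[int, str]:
--     """
--     Convert staff position + clef to MIDI pitch and note name.
--
--     Args:
--         position: Staff position (0-8 typical, negative for ledger lines below, >8 for above)
--         clef: "treble", "bass", "alto", or "tenor"
--         fifths: Key signature as number of sharps (positive) or flats (negative)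
--
--     Returns:
--         (midi_number, pitch_name) e.g. (71, "B4") or (65, "F4")
--     """
--     ref_note_idx, ref_octave = CLEF_REF.get(clef, CLEF_REF["treble"])
--
--     total_idx = ref_note_idx + position
--     if total_idx >= 0:
--         octave = ref_octave + total_idx // 7
--         note_within = total_idx % 7
--     else:
--         octave = ref_octave + (total_idx - 6) // 7
--         note_within = total_idx % 7
--
--     base_midi = (octave + 1) * 12 + DIATONIC_SEMITONES[note_within]
--     note_name = NOTE_NAMES[note_within]
--
--     # Apply key signature
--     accidental = ""
--     if fifths > 0:
--         for i in range(min(fifths, 7)):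
--             if note_within == SHARP_ORDER[i]:
--                 base_midi += 1
--                 accidental = "#"
--                 break
--     elif fifths < 0:
--         for i in range(min(-fifths, 7)):
--             if note_within == FLAT_ORDER[i]:
--                 base_midi -= 1
--                 accidental = "b"
--                 break
--
--     pitch_name = f"{note_name}{accidental}{octave}"
--     return base_midi, pitch_name
--
-- def determine_clef_from_positions(note_positions: list[dict]) -> str:
--     """
--     Determine clef by computing pitches for both treble and bass,
--     then checking which produces a more typical range.
--     """
--     positions = [np["position"] for np in note_positions if "position" in np]
--     if not positions:
--         return "treble"
--
--     treble_pitches = [position_to_midi(p, "treble")[0] for p in positions]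
--     bass_pitches = [position_to_midi(p, "bass")[0] for p in positions]
--
--     treble_median = sorted(treble_pitches)[len(treble_pitches) // 2]
--     bass_median = sorted(bass_pitches)[len(bass_pitches) // 2]
--
--     treble_dist = abs(treble_median - 71)
--     bass_dist = abs(bass_median - 50)
--
--     if treble_dist < bass_dist:
--         return "treble"
--     elif bass_dist < treble_dist:
--         return "bass"
--     else:
--         return "treble"
-- ===== SOURCE B (Python) =====
-- DIATONIC_SEMITONES = [0, 2, 4, 5, 7, 9, 11]
--
-- NOTE_NAMES = ["C", "D", "E", "F", "G", "A", "B"]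
--
-- CLEF_REF = {
--     "treble": (1, 4),
--     "bass": (3, 2),
--     "alto": (2, 3),
--     "tenor": (0, 3),
-- }
--
-- SHARP_ORDER = [3, 0, 4, 1, 5, 2, 6]
--
-- FLAT_ORDER = [6, 2, 5, 1, 4, 0, 3]
--
--
-- def position_to_midi(position: int, clef: str, fifths: int = 0) -> tuple[int, str]:
--     ref_note_idx, ref_octave = CLEF_REF.get(clef, CLEF_REF["treble"])
--
--     total_idx = ref_note_idx + position
--     if total_idx >= 0:
--         octave = ref_octave + total_idx // 7
--         note_within = total_idx % 7
--     else:
--         octave = ref_octave + (total_idx - 6) // 7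
--         note_within = total_idx % 7
--
--     base_midi = (octave + 1) * 12 + DIATONIC_SEMITONES[note_within]
--     note_name = NOTE_NAMES[note_within]
--
--     accidental = ""
--     if fifths > 0:
--         for i in range(min(fifths, 7)):
--             if note_within == SHARP_ORDER[i]:
--                 base_midi += 1
--                 accidental = "#"
--                 break
--     elif fifths < 0:
--         for i in range(min(-fifths, 7)):
--             if note_within == FLAT_ORDER[i]:
--                 base_midi -= 1
--                 accidental = "b"
--                 break
--
--     pitch_name = f"{note_name}{accidental}{octave}"
--     return base_midi, pitch_name
--
--
-- def _kth_smallest(xs, k):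
--     """The element that full sorting would put at index k, found by counting:
--     the first v in xs with (# of elements < v) <= k < (# of elements <= v)."""
--     for v in xs:
--         below = sum(1 for x in xs if x < v)
--         at_or_below = sum(1 for x in xs if x <= v)
--         if below <= k < at_or_below:
--             return v
--
--
-- def determine_clef_from_positions(note_positions: list[dict]) -> str:
--     positions = [np["position"] for np in note_positions if "position" in np]
--     if not positions:
--         return "treble"
--
--     k = len(positions) // 2
--     treble_median = _kth_smallest([position_to_midi(p, "treble")[0] for p in positions], k)
--     bass_median = _kth_smallest([position_to_midi(p, "bass")[0] for p in positions], k)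
--
--     treble_dist = abs(treble_median - 71)
--     bass_dist = abs(bass_median - 50)
--
--     if bass_dist < treble_dist:
--         return "bass"
--     return "treble"
-- ===== Notes on version B (the rewrite author's own statement) =====
-- stated objective: alternative
-- what changed: B replaces the two full sorts of the derived pitch lists by a selection procedure: the median element sorted(xs)[len(xs)//2] is found directly as the first element v with countP(<v) <= k < countP(<=v), so no sorted list is ever built; the final comparison is collapsed to a single branch.
import Mathlib
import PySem

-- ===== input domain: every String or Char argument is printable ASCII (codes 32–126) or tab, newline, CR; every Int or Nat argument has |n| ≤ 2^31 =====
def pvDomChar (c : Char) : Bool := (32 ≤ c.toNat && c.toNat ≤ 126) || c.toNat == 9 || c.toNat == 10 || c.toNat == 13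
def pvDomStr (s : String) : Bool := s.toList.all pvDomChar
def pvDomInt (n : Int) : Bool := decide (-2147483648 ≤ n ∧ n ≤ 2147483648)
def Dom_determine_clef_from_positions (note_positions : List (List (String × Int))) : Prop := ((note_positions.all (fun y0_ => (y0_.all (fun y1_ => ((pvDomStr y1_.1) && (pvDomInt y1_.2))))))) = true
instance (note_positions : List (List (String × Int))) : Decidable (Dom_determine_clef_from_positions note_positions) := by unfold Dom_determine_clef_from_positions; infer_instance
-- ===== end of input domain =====

-- B replaces the two full sorts of A by a direct counting-based selection of the median
-- element; objective: alternative algorithm (same results, no sorted list ever built).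

-- ===== PORT A =====
-- module constants shared by both Python versions
def DIATONIC_SEMITONES : List Int := [0, 2, 4, 5, 7, 9, 11]
def NOTE_NAMES : List String := ["C", "D", "E", "F", "G", "A", "B"]
def CLEF_REF : PySem.Dict String (Int × Int) :=
  PySem.Dict.ofList [("treble", (1, 4)), ("bass", (3, 2)), ("alto", (2, 3)), ("tenor", (0, 3))]
def SHARP_ORDER : List Int := [3, 0, 4, 1, 5, 2, 6]
def FLAT_ORDER : List Int := [6, 2, 5, 1, 4, 0, 3]

-- shared helper position_to_midi (identical source in Source A and Source B).
-- List indices: note_within = total_idx % 7 ∈ [0,7) and the range indices i < 7 are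
-- always in range, so the total pyGetD forms are exact here.
def position_to_midi (position : Int) (clef : String) (fifths : Int) : Int × String :=
  let ref := PySem.Dict.getD CLEF_REF clef (1, 4)
  let ref_note_idx := ref.1
  let ref_octave := ref.2
  let total_idx := ref_note_idx + position
  let octave : Int :=
    if total_idx ≥ 0 then ref_octave + PySem.Int.floordiv total_idx 7
    else ref_octave + PySem.Int.floordiv (total_idx - 6) 7
  let note_within : Int := PySem.Int.mod total_idx 7
  let base_midi := (octave + 1) * 12 + PySem.List.pyGetD DIATONIC_SEMITONES note_within 0
  let note_name := PySem.List.pyGetD NOTE_NAMES note_within ""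
  -- the for-loops with break: first i in range(min(fifths,7)) with note_within == ORDER[i]
  let res : Int × String :=
    if fifths > 0 then
      match (PySem.List.pyRange 0 (min fifths 7) 1).find?
          (fun i => note_within == PySem.List.pyGetD SHARP_ORDER i (-1)) with
      | some _ => (base_midi + 1, "#")
      | none => (base_midi, "")
    else if fifths < 0 then
      match (PySem.List.pyRange 0 (min (-fifths) 7) 1).find?
          (fun i => note_within == PySem.List.pyGetD FLAT_ORDER i (-1)) with
      | some _ => (base_midi - 1, "b")
      | none => (base_midi, "")
    else (base_midi, "")
  (res.1, note_name ++ res.2 ++ PySem.Int.toStr octave)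

-- A: build both pitch lists, sort each, take the middle element, compare distances.
-- sorted(xs)[len(xs)//2]: the index is a nonnegative in-range Nat (len > 0), so getD is exact.
def determine_clef_from_positions (note_positions : List (List (String × Int))) : String :=
  let positions := note_positions.filterMap
    (fun np => (np.find? (fun kv => kv.1 == "position")).map (·.2))
  if positions = [] then "treble"
  else
    let treble_pitches := positions.map (fun p => (position_to_midi p "treble" 0).1)
    let bass_pitches := positions.map (fun p => (position_to_midi p "bass" 0).1)
    let treble_median := (PySem.List.sorted treble_pitches (fun x => x) false).getD (treble_pitches.length / 2) 0
    let bass_median := (PySem.List.sorted bass_pitches (fun x => x) false).getD (bass_pitches.length / 2) 0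
    let treble_dist := |treble_median - 71|
    let bass_dist := |bass_median - 50|
    if treble_dist < bass_dist then "treble"
    else if bass_dist < treble_dist then "bass"
    else "treble"

-- ===== PORT B =====
-- _kth_smallest: first v in xs with (# elements < v) ≤ k < (# elements ≤ v)
def kth_smallest (xs : List Int) (k : Nat) : Option Int :=
  xs.find? (fun v => decide (xs.countP (fun x => decide (x < v)) ≤ k) &&
                     decide (k < xs.countP (fun x => decide (x ≤ v))))

-- B: same positions and pitch lists, median found by counting-selection, single branch.
-- _kth_smallest always returns a value for k < len, so getD 0 is exact.
def determine_clef_from_positions_alt (note_positions : List (List (String × Int))) : String :=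
  let positions := note_positions.filterMap
    (fun np => (np.find? (fun kv => kv.1 == "position")).map (·.2))
  if positions = [] then "treble"
  else
    let k := positions.length / 2
    let treble_median := (kth_smallest (positions.map (fun p => (position_to_midi p "treble" 0).1)) k).getD 0
    let bass_median := (kth_smallest (positions.map (fun p => (position_to_midi p "bass" 0).1)) k).getD 0
    let treble_dist := |treble_median - 71|
    let bass_dist := |bass_median - 50|
    if bass_dist < treble_dist then "bass" else "treble"

-- ===== PRECONDITION & SPEC =====
def Spec_determine_clef_from_positions (note_positions : List (List (String × Int))) (out : String) : Prop := out = determine_clef_from_positions_alt note_positions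
instance (note_positions : List (List (String × Int))) (out : String) : Decidable (Spec_determine_clef_from_positions note_positions out) := by unfold Spec_determine_clef_from_positions; infer_instance

-- ===== CLAIM (what is proved, stated in full; the proofs are below) =====
def Claim_equal_determine_clef_from_positions : Prop := ∀ (note_positions : List (List (String × Int))), Dom_determine_clef_from_positions note_positions → Spec_determine_clef_from_positions note_positions (determine_clef_from_positions note_positions)

-- ===== LEMMAS AND PROOFS =====

-- the selection predicate used by kth_smallest
def selPred (xs : List Int) (k : Nat) (v : Int) : Bool :=
  decide (xs.countP (fun x => decide (x < v)) ≤ k) &&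
  decide (k < xs.countP (fun x => decide (x ≤ v)))

theorem selPred_sorted_mid (xs : List Int) (k : Nat)
    (hks : k < (PySem.List.sorted xs (fun x => x) false).length) :
    selPred xs k ((PySem.List.sorted xs (fun x => x) false).getD k 0) = true := by
  set s := PySem.List.sorted xs (fun x => x) false with hs
  rw [List.getD_eq_getElem s 0 hks]
  set v := s[k] with hv
  have hperm : s.Perm xs := PySem.List.sorted_perm xs (fun x => x) false
  have hpw : s.Pairwise (fun a b => a ≤ b) := PySem.List.sorted_pairwise xs (fun x => x)
  have hmono : ∀ i j (hi : i < s.length) (hj : j < s.length), i ≤ j → s[i] ≤ s[j] := by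
    intro i j hi hj hij
    rcases Nat.lt_or_ge i j with h | h
    · exact (List.pairwise_iff_getElem.mp hpw) i j hi hj h
    · have : i = j := Nat.le_antisymm hij h
      subst this; exact le_refl _
  have c1 : s.countP (fun x => decide (x < v)) ≤ k := by
    conv_lhs => rw [← List.take_append_drop k s]
    rw [List.countP_append]
    have hdrop : (s.drop k).countP (fun x => decide (x < v)) = 0 := by
      rw [List.countP_eq_zero]
      intro a ha
      rcases List.mem_iff_getElem.mp ha with ⟨i, hi, rfl⟩
      have hlen : (s.drop k).length = s.length - k := List.length_drop
      have hik : k + i < s.length := by omega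
      rw [List.getElem_drop]
      have : v ≤ s[k + i] := hmono k (k + i) hks hik (Nat.le_add_right _ _)
      simp only [decide_eq_true_eq]
      omega
    rw [hdrop, Nat.add_zero]
    calc (s.take k).countP (fun x => decide (x < v)) ≤ (s.take k).length := List.countP_le_length
      _ ≤ k := by rw [List.length_take]; omega
  have c2 : k < s.countP (fun x => decide (x ≤ v)) := by
    have htake : (s.take (k + 1)).countP (fun x => decide (x ≤ v)) = k + 1 := by
      have hall : ∀ a ∈ s.take (k + 1), (fun x => decide (x ≤ v)) a = true := by
        intro a ha
        rcases List.mem_iff_getElem.mp ha with ⟨i, hi, rfl⟩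
        have hlen : (s.take (k + 1)).length = min (k + 1) s.length := List.length_take
        have hik : i < s.length := by omega
        rw [List.getElem_take]
        have : s[i] ≤ v := hmono i k hik hks (by omega)
        simpa using this
      calc (s.take (k + 1)).countP (fun x => decide (x ≤ v))
          = (s.take (k + 1)).length := List.countP_eq_length.mpr hall
        _ = k + 1 := by rw [List.length_take]; omega
    have : (s.take (k + 1)).countP (fun x => decide (x ≤ v)) ≤ s.countP (fun x => decide (x ≤ v)) := by
      conv_rhs => rw [← List.take_append_drop (k + 1) s]
      rw [List.countP_append]
      exact Nat.le_add_right _ _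
    omega
  have e1 : xs.countP (fun x => decide (x < v)) = s.countP (fun x => decide (x < v)) :=
    (hperm.countP_eq _).symm
  have e2 : xs.countP (fun x => decide (x ≤ v)) = s.countP (fun x => decide (x ≤ v)) :=
    (hperm.countP_eq _).symm
  simp only [selPred, e1, e2, Bool.and_eq_true, decide_eq_true_eq]
  exact ⟨c1, c2⟩

theorem selPred_unique (xs : List Int) (k : Nat) (v w : Int)
    (hv : selPred xs k v = true) (hw : selPred xs k w = true) : w = v := by
  simp only [selPred, Bool.and_eq_true, decide_eq_true_eq] at hv hw
  rcases lt_trichotomy w v with h | h | h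
  · have hm : xs.countP (fun x => decide (x ≤ w)) ≤ xs.countP (fun x => decide (x < v)) := by
      apply List.countP_mono_left
      intro a _ ha
      simp only [decide_eq_true_eq] at *
      omega
    omega
  · exact h
  · have hm : xs.countP (fun x => decide (x ≤ v)) ≤ xs.countP (fun x => decide (x < w)) := by
      apply List.countP_mono_left
      intro a _ ha
      simp only [decide_eq_true_eq] at *
      omega
    omega

-- the counting selection finds exactly the element a full sort puts at index k
theorem kth_smallest_eq_sorted (xs : List Int) (k : Nat) (hk : k < xs.length) :
    kth_smallest xs k = some ((PySem.List.sorted xs (fun x => x) false).getD k 0) := by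
  have hlen : (PySem.List.sorted xs (fun x => x) false).length = xs.length :=
    (PySem.List.sorted_perm xs (fun x => x) false).length_eq
  have hks : k < (PySem.List.sorted xs (fun x => x) false).length := by omega
  have hmid := selPred_sorted_mid xs k hks
  have hmem : (PySem.List.sorted xs (fun x => x) false).getD k 0 ∈ xs := by
    have h1 : (PySem.List.sorted xs (fun x => x) false).getD k 0
        ∈ PySem.List.sorted xs (fun x => x) false := by
      rw [List.getD_eq_getElem _ 0 hks]; exact List.getElem_mem hks
    exact ((PySem.List.sorted_perm xs (fun x => x) false).mem_iff).mp h1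
  have hfind : kth_smallest xs k = xs.find? (selPred xs k) := by
    unfold kth_smallest selPred; rfl
  have hsome : (xs.find? (selPred xs k)).isSome := by
    rw [List.find?_isSome]
    exact ⟨_, hmem, hmid⟩
  rcases Option.isSome_iff_exists.mp hsome with ⟨w, hw⟩
  have hwp : selPred xs k w = true := List.find?_some hw
  have hwv : w = (PySem.List.sorted xs (fun x => x) false).getD k 0 :=
    selPred_unique xs k _ w hmid hwp
  rw [hfind, hw, hwv]

theorem determine_clef_eq (note_positions : List (List (String × Int))) :
    determine_clef_from_positions note_positions = determine_clef_from_positions_alt note_positions := by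
  unfold determine_clef_from_positions determine_clef_from_positions_alt
  set positions := note_positions.filterMap
    (fun np => (np.find? (fun kv => kv.1 == "position")).map (·.2)) with hpos
  by_cases hempty : positions = []
  · simp [hempty]
  · simp only [if_neg hempty]
    have hlen : 0 < positions.length := List.length_pos_iff.mpr hempty
    have hk : positions.length / 2 < positions.length := Nat.div_lt_self hlen (by omega)
    have hkt : positions.length / 2 < (positions.map (fun p => (position_to_midi p "treble" 0).1)).length := by
      rw [List.length_map]; exact hk
    have hkb : positions.length / 2 < (positions.map (fun p => (position_to_midi p "bass" 0).1)).length := by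
      rw [List.length_map]; exact hk
    rw [kth_smallest_eq_sorted _ _ hkt, kth_smallest_eq_sorted _ _ hkb]
    simp only [Option.getD_some, List.length_map]
    set tm := (PySem.List.sorted (positions.map (fun p => (position_to_midi p "treble" 0).1)) (fun x => x) false).getD (positions.length / 2) 0
    set bm := (PySem.List.sorted (positions.map (fun p => (position_to_midi p "bass" 0).1)) (fun x => x) false).getD (positions.length / 2) 0
    by_cases h1 : |tm - 71| < |bm - 50|
    · rw [if_pos h1, if_neg (by omega)]
    · rw [if_neg h1]
      by_cases h2 : |bm - 50| < |tm - 71|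
      · rw [if_pos h2, if_pos h2]
      · rw [if_neg h2, if_neg h2]

-- ===== VERDICT (by name: the statement is the Claim_ definition above) =====
theorem determine_clef_from_positions_spec : Claim_equal_determine_clef_from_positions := by
  intro note_positions _
  exact determine_clef_eq note_positions
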